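-- pv_equiv track=rewrite | github.com/KiskachiMaria/Cubefree_words | log_gen.py | log_gen
-- ===== SOURCE A (Python) =====
-- def log_gen(gen_count, str_len, zero_len):
-- 	if gen_count == 0:
-- 		return [""]
-- 	list = []
-- 	for log in log_gen(gen_count - 1, str_len + 1, 0):
-- 		list.append("1" + log)
-- 	if str_len >= 3 * (zero_len + 1):
-- 		for log in log_gen(gen_count - 1, str_len - (zero_len + 1), zero_len + 1):
-- 			list.append("0" + log)
-- 	return list
-- ===== SOURCE B (Python) =====
-- def log_gen(gen_count, str_len, zero_len):
--     result = []
--     stack = [("", str_len, zero_len, gen_count)]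
--     while stack:
--         prefix, s, z, rem = stack.pop()
--         if rem == 0:
--             result.append(prefix)
--             continue
--         if s >= 3 * (z + 1):
--             stack.append((prefix + "0", s - (z + 1), z + 1, rem - 1))
--         stack.append((prefix + "1", s + 1, 0, rem - 1))
--     return result
-- ===== Notes on version B (the rewrite author's own statement) =====
-- stated objective: alternative
-- what changed: Replaced the branching recursion (which prepends characters to each recursively built suffix) by an iterative DFS over an explicit stack of (prefix, str_len, zero_len, remaining) states that builds each string left-to-right, pushing the '0' branch before the '1' branch so the output order matches A's.
import Mathlib
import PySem

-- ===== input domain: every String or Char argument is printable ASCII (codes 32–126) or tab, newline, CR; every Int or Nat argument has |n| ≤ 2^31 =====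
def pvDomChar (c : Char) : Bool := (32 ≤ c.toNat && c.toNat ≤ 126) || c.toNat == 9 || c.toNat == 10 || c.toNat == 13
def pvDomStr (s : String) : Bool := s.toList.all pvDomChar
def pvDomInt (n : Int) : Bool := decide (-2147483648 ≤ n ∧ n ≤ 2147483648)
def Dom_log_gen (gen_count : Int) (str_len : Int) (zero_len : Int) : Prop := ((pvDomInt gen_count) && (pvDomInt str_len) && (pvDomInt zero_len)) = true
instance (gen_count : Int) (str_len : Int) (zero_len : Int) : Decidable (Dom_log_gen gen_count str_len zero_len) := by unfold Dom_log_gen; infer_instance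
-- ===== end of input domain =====

-- B replaces A's branching recursion by an iterative DFS over an explicit stack of states,
-- building strings left-to-right; same output, same cost (objective: alternative).

-- ===== PORT A =====
-- A's recursion, fuel = gen_count.toNat (faithful exactly for gen_count ≥ 0, i.e. on Pre_;
-- for negative gen_count Python A never returns — it hits RecursionError).
def logGenRec (n : Nat) (str_len : Int) (zero_len : Int) : List String :=
  match n with
  | 0 => [""]
  | Nat.succ m =>
    let list := (logGenRec m (str_len + 1) 0).foldl (fun acc log => acc ++ ["1" ++ log]) []
    if str_len ≥ 3 * (zero_len + 1) then
      (logGenRec m (str_len - (zero_len + 1)) (zero_len + 1)).foldl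
        (fun acc log => acc ++ ["0" ++ log]) list
    else list

def log_gen (gen_count : Int) (str_len : Int) (zero_len : Int) : List String :=
  logGenRec gen_count.toNat str_len zero_len

-- ===== PORT B =====
-- the DFS stack loop of Source B; an entry is (pfx, str_len, zero_len, remaining);
-- the head of the list is the top of the stack; remaining is a Nat (= rem.toNat, exact for rem ≥ 0)
def logGenLoop (stack : List (String × Int × Int × Nat)) (result : List String) : List String :=
  match stack with
  | [] => result
  | (pfx, _, _, 0) :: rest => logGenLoop rest (result ++ [pfx])
  | (pfx, s, z, Nat.succ m) :: rest =>
    if s ≥ 3 * (z + 1) then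
      logGenLoop ((pfx ++ "1", s + 1, 0, m) :: (pfx ++ "0", s - (z + 1), z + 1, m) :: rest) result
    else
      logGenLoop ((pfx ++ "1", s + 1, 0, m) :: rest) result
termination_by (stack.map (fun e => 3 ^ e.2.2.2)).sum
decreasing_by
  · simp
  · have h3 : 3 ^ m + 3 ^ m < 3 ^ (m + 1) := by
      have hp : 0 < 3 ^ m := Nat.pow_pos (by omega)
      simp [pow_succ]; omega
    simp; omega
  · have h3 : 3 ^ m + 3 ^ m < 3 ^ (m + 1) := by
      have hp : 0 < 3 ^ m := Nat.pow_pos (by omega)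
      simp [pow_succ]; omega
    simp; omega

def log_gen_alt (gen_count : Int) (str_len : Int) (zero_len : Int) : List String :=
  logGenLoop [("", str_len, zero_len, gen_count.toNat)] []

-- ===== PRECONDITION & SPEC =====
-- Pre_ excludes gen_count < 0, on which Python A recurses without a base case and raises RecursionError.
def Pre_log_gen (gen_count : Int) (str_len : Int) (zero_len : Int) : Prop := 0 ≤ gen_count
instance (gen_count : Int) (str_len : Int) (zero_len : Int) : Decidable (Pre_log_gen gen_count str_len zero_len) := by unfold Pre_log_gen; infer_instance
def pvWitness_log_gen : Int × Int × Int := (4, 4, 0)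

def Spec_log_gen (gen_count : Int) (str_len : Int) (zero_len : Int) (out : List String) : Prop := out = log_gen_alt gen_count str_len zero_len
instance (gen_count : Int) (str_len : Int) (zero_len : Int) (out : List String) : Decidable (Spec_log_gen gen_count str_len zero_len out) := by unfold Spec_log_gen; infer_instance

-- ===== CLAIM (what is proved, stated in full; the proofs are below) =====
def Claim_equal_log_gen : Prop := ∀ (gen_count : Int) (str_len : Int) (zero_len : Int), Dom_log_gen gen_count str_len zero_len → Pre_log_gen gen_count str_len zero_len → Spec_log_gen gen_count str_len zero_len (log_gen gen_count str_len zero_len)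

-- ===== LEMMAS AND PROOFS =====

theorem foldl_push (c : String) (l : List String) (init : List String) :
    l.foldl (fun acc log => acc ++ [c ++ log]) init = init ++ l.map (fun x => c ++ x) := by
  induction l generalizing init with
  | nil => simp
  | cons h t ih => simp [List.foldl, ih]

theorem logGenRec_succ (m : Nat) (s z : Int) :
    logGenRec (m + 1) s z =
      (logGenRec m (s + 1) 0).map (fun x => "1" ++ x) ++
      (if s ≥ 3 * (z + 1) then (logGenRec m (s - (z + 1)) (z + 1)).map (fun x => "0" ++ x) else []) := by
  simp only [logGenRec, foldl_push]
  split <;> simp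

theorem string_append_assoc (a b c : String) : a ++ b ++ c = a ++ (b ++ c) := by
  apply String.ext; simp

theorem logGenLoop_eq (stack : List (String × Int × Int × Nat)) (result : List String) :
    logGenLoop stack result =
      result ++ stack.flatMap (fun e => (logGenRec e.2.2.2 e.2.1 e.2.2.1).map (fun x => e.1 ++ x)) := by
  induction stack, result using logGenLoop.induct with
  | case1 result => simp [logGenLoop]
  | case2 result p s z rest ih =>
    simp only [logGenLoop, ih]
    simp [logGenRec]
  | case3 result p s z m rest hc ih =>
    simp only [logGenLoop, if_pos hc]
    rw [ih]
    simp [logGenRec_succ, if_pos hc, List.map_map, Function.comp_def, string_append_assoc]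
  | case4 result p s z m rest hc ih =>
    simp only [logGenLoop, if_neg hc]
    rw [ih]
    simp [logGenRec_succ, if_neg hc, List.map_map, Function.comp_def, string_append_assoc]

theorem log_gen_spec' (gen_count str_len zero_len : Int) :
    log_gen gen_count str_len zero_len = log_gen_alt gen_count str_len zero_len := by
  simp [log_gen, log_gen_alt, logGenLoop_eq]

-- ===== VERDICT (by name: the statement is the Claim_ definition above) =====
theorem log_gen_spec : Claim_equal_log_gen := by
  intro g s z _ _
  unfold Spec_log_gen
  exact log_gen_spec' g s z
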